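-- pv_equiv track=rewrite | github.com/SaLaaH-sama/IA-SYN-C | local_beat_the_plan/src/sync/executor_sync.py | check_is_string_is_ascii_printable_with_escape
-- ===== SOURCE A (Python) =====
-- def check_is_string_is_ascii_printable_with_escape(s):
--     """
--     Vérifie si tous les caractères de s sont ascii et affichable (nombre, lettres, ponctuation ou espace) ou des
--     caractères échappés ASCII (\n, \r, \t, \v, \f, \0,, \' et \\)
--     :param s:
--     :return: L'indice du premier caractère qui ne vérifie pas cette propriété ou None si la chaîne est correcte.
--     """
--     check_escape = False
--     for i, c in enumerate(s):
--         if not check_escape and c == '\\':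
--             check_escape = True
--             continue
--         elif check_escape:
--             if c in "0tvrnf\\'":
--                 check_escape = False
--                 continue
--         elif 32 <= ord(c) <= 126:
--             continue
--
--         return i
-- ===== SOURCE B (Python) =====
-- def check_is_string_is_ascii_printable_with_escape(s):
--     i = 0
--     n = len(s)
--     while i < n:
--         c = s[i]
--         if c == '\\':
--             if i + 1 == n:
--                 return None  # trailing backslash: loop in A ends with flag set, no index returned
--             if s[i + 1] in "0tvrnf\\'":
--                 i += 2
--             else:
--                 return i + 1
--         elif 32 <= ord(c) <= 126:
--             i += 1
--         else:
--             return i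
--     return None
-- ===== Notes on version B (the rewrite author's own statement) =====
-- stated objective: alternative
-- what changed: Replaces A's carried check_escape boolean flag with an index-based variable-stride scan that consumes a backslash and its escaped character in one step (stride 2), removing all cross-iteration state.
import Mathlib
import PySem

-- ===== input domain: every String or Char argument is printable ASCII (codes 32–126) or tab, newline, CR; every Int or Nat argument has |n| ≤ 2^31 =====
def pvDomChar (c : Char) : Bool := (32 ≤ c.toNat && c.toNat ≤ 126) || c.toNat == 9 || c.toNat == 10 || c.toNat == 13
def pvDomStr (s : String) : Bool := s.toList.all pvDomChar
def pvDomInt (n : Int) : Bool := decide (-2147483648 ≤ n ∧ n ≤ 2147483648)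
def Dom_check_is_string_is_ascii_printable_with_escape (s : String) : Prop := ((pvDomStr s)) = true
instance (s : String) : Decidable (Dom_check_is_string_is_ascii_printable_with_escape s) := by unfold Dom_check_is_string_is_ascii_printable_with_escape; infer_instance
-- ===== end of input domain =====

-- B replaces A's carried check_escape flag with an index-based variable-stride scan (alternative decomposition; same O(n) cost).
-- ===== PORT A =====
-- Python: `c in "0tvrnf\\'"`
def pvEscSet : List Char := "0tvrnf\\'".toList

-- the for-loop over enumerate(s) carrying the check_escape flag
def pvAGo (i : Int) (check_escape : Bool) : List Char → Option Int
  | [] => none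
  | c :: rest =>
    if !check_escape && c == '\\' then pvAGo (i + 1) true rest
    else if check_escape then
      (if pvEscSet.contains c then pvAGo (i + 1) false rest else some i)
    else if 32 ≤ c.toNat ∧ c.toNat ≤ 126 then pvAGo (i + 1) check_escape rest
    else some i

def check_is_string_is_ascii_printable_with_escape (s : String) : Option Int :=
  pvAGo 0 false s.toList

-- ===== PORT B =====
-- the `while i < n` loop with stride 1 or 2: a backslash and its escaped char are consumed together
def pvBGo (i : Int) : List Char → Option Int
  | [] => none
  | c :: rest =>
    if c == '\\' then
      match rest with
      | [] => none
      | d :: rest2 => if pvEscSet.contains d then pvBGo (i + 2) rest2 else some (i + 1)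
    else if 32 ≤ c.toNat ∧ c.toNat ≤ 126 then pvBGo (i + 1) rest
    else some i

def check_is_string_is_ascii_printable_with_escape_alt (s : String) : Option Int :=
  pvBGo 0 s.toList

-- ===== PRECONDITION & SPEC =====
def Spec_check_is_string_is_ascii_printable_with_escape (s : String) (out : Option Int) : Prop := out = check_is_string_is_ascii_printable_with_escape_alt s
instance (s : String) (out : Option Int) : Decidable (Spec_check_is_string_is_ascii_printable_with_escape s out) := by unfold Spec_check_is_string_is_ascii_printable_with_escape; infer_instance

-- ===== CLAIM (what is proved, stated in full; the proofs are below) =====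
def Claim_equal_check_is_string_is_ascii_printable_with_escape : Prop := ∀ (s : String), Dom_check_is_string_is_ascii_printable_with_escape s → Spec_check_is_string_is_ascii_printable_with_escape s (check_is_string_is_ascii_printable_with_escape s)

-- ===== LEMMAS AND PROOFS =====

-- ===== VERDICT (by name: the statement is the Claim_ definition above) =====
theorem pvKey : ∀ (cs : List Char) (i : Int), pvAGo i false cs = pvBGo i cs
  | [], _ => rfl
  | [c], i => by
    by_cases h : c = '\\'
    · simp [pvAGo, pvBGo, h]
    · simp [pvAGo, pvBGo, h]
  | c :: d :: rest, i => by
    by_cases h : c = '\\'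
    · by_cases hd : d ∈ pvEscSet
      · have e : i + 1 + 1 = i + 2 := by ring
        simp [pvAGo, pvBGo, h, hd, e, pvKey rest (i + 2)]
      · simp [pvAGo, pvBGo, h, hd]
    · by_cases hp : 32 ≤ c.toNat ∧ c.toNat ≤ 126
      · have ha : pvAGo i false (c :: d :: rest) = pvAGo (i + 1) false (d :: rest) := by
          simp [pvAGo, h, hp]
        have hb : pvBGo i (c :: d :: rest) = pvBGo (i + 1) (d :: rest) := by
          simp [pvBGo, h, hp]
        rw [ha, hb, pvKey (d :: rest) (i + 1)]
      · simp [pvAGo, pvBGo, h, hp]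

theorem check_is_string_is_ascii_printable_with_escape_spec : Claim_equal_check_is_string_is_ascii_printable_with_escape := by
  intro s _
  unfold Spec_check_is_string_is_ascii_printable_with_escape
  exact pvKey s.toList 0
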